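-- pv_equiv track=rewrite | github.com/gh1818-o/stock | 원본.py | parse_peer_codes
-- ===== SOURCE A (Python) =====
-- def parse_peer_codes(peer_str: str) -> list[str]:
--     raw = (peer_str or "").replace("\n", " ").replace("\t", " ").replace(",", " ")
--     toks = [t.strip() for t in raw.split(" ") if t.strip()]
--     codes = []
--     for t in toks:
--         digits = "".join([c for c in t if c.isdigit()])
--         if digits:
--             codes.append(digits.zfill(6))
--     return list(dict.fromkeys(codes))
-- ===== SOURCE B (Python) =====
-- def parse_peer_codes(peer_str: str) -> list[str]:
--     # single pass: state machine over characters, dedup while appending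
--     out = []
--     seen = set()
--     buf = ""
--     for c in (peer_str or ""):
--         if c in (" ", "\n", "\t", ","):
--             if buf:
--                 code = buf.zfill(6)
--                 if code not in seen:
--                     seen.add(code)
--                     out.append(code)
--                 buf = ""
--         elif c.isdigit():
--             buf += c
--     if buf:
--         code = buf.zfill(6)
--         if code not in seen:
--             seen.add(code)
--             out.append(code)
--     return out
-- ===== Notes on version B (the rewrite author's own statement) =====
-- stated objective: alternative
-- what changed: Replaced the three whole-string replace() passes, the split/strip/filter token pipeline and the final dict.fromkeys dedup by one character-level state machine that buffers digits, flushes on separators, and deduplicates on the fly with a seen-set.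
import Mathlib
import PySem

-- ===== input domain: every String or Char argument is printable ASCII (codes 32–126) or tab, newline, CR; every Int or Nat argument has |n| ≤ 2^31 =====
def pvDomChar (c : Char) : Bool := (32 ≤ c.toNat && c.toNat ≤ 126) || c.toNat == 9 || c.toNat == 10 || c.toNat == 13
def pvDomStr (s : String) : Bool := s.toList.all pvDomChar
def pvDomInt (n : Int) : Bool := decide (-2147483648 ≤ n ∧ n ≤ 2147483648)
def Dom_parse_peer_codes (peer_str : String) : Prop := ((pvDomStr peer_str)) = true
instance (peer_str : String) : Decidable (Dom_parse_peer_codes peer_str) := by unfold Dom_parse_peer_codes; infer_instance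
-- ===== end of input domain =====

-- B replaces A's replace/split/strip token pipeline by one character-scan state machine with on-the-fly dedup (objective: alternative, same O(n)).

-- ===== PORT A =====
def parse_peer_codes (peer_str : String) : List String :=
  let raw := PySem.Str.replace (PySem.Str.replace (PySem.Str.replace peer_str "\n" " ") "\t" " ") "," " "
  let toks := (((PySem.Str.split? raw " ").getD []).map PySem.Str.strip).filter (fun t => t ≠ "")
  let codes := toks.foldl (fun codes t =>
    let digits := String.ofList (t.toList.filter PySem.Chars.isdigit)
    if digits ≠ "" then codes ++ [PySem.Str.zfill digits 6] else codes) ([] : List String)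
  PySem.List.dedup codes

-- ===== PORT B =====
def pvIsSepB (c : Char) : Bool := c = ' ' || c = '\n' || c = '\t' || c = ','

-- flush the digit buffer: emit buf.zfill(6) unless already seen, clear buf
def pvFlushB (st : List String × PySem.Set String × List Char) : List String × PySem.Set String × List Char :=
  if st.2.2 = [] then st
  else
    let code := PySem.Str.zfill (String.ofList st.2.2) 6
    if st.2.1.contains code then (st.1, st.2.1, [])
    else (st.1 ++ [code], PySem.Set.add st.2.1 code, [])

def pvStepB (st : List String × PySem.Set String × List Char) (c : Char) : List String × PySem.Set String × List Char :=
  if pvIsSepB c then pvFlushB st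
  else if PySem.Chars.isdigit c then (st.1, st.2.1, st.2.2 ++ [c])
  else st

def parse_peer_codes_alt (peer_str : String) : List String :=
  (pvFlushB (peer_str.toList.foldl pvStepB ([], PySem.Set.empty, []))).1

-- ===== PRECONDITION & SPEC =====
def Spec_parse_peer_codes (peer_str : String) (out : List String) : Prop := out = parse_peer_codes_alt peer_str
instance (peer_str : String) (out : List String) : Decidable (Spec_parse_peer_codes peer_str out) := by unfold Spec_parse_peer_codes; infer_instance

-- ===== CLAIM (what is proved, stated in full; the proofs are below) =====
def Claim_equal_parse_peer_codes : Prop := ∀ (peer_str : String), Dom_parse_peer_codes peer_str → Spec_parse_peer_codes peer_str (parse_peer_codes peer_str)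

-- ===== LEMMAS AND PROOFS =====

-- map all four separators to ' ' (the composite of A's three replaces)
def pvSig (c : Char) : Char := if pvIsSepB c then ' ' else c

-- split on a single character (natural recursion mirroring str.split(" "))
def pvSplitCh (s : Char) : List Char → List (List Char)
  | [] => [[]]
  | c :: t => if c = s then [] :: pvSplitCh s t
              else match pvSplitCh s t with
                   | [] => [[c]]
                   | p :: ps => (c :: p) :: ps

def pvCode (d : List Char) : String := PySem.Str.zfill (String.ofList d) 6

-- the zfilled digit strings A collects from a token list (before dedup)
def pvCodes (ts : List (List Char)) : List String :=
  ts.filterMap (fun p =>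
    if p.filter PySem.Chars.isdigit = [] then none
    else some (pvCode (p.filter PySem.Chars.isdigit)))

-- B's scan without the dedup bookkeeping
def pvScan : List Char → List Char → List String
  | buf, [] => if buf = [] then [] else [pvCode buf]
  | buf, c :: t =>
      if pvIsSepB c then (if buf = [] then [] else [pvCode buf]) ++ pvScan [] t
      else if PySem.Chars.isdigit c then pvScan (buf ++ [c]) t
      else pvScan buf t

lemma pv_replace_go (a b : Char) : ∀ (l acc : List Char) (fuel : Nat), l.length ≤ fuel →
    PySem.Chars.replace.go [a] [b] fuel l acc = acc.reverse ++ l.map (fun c => if c = a then b else c) := by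
  intro l
  induction l with
  | nil =>
    intro acc fuel _
    cases fuel <;> simp [PySem.Chars.replace.go]
  | cons c t ih =>
    intro acc fuel hf
    cases fuel with
    | zero => simp at hf
    | succ f =>
      have ht : t.length ≤ f := by simpa using hf
      rw [PySem.Chars.replace.go]
      by_cases h : c = a
      · subst h
        simp [List.isPrefixOf, ih _ _ ht]
      · simp [List.isPrefixOf, h, ih _ _ ht, Ne.symm h]

lemma pv_replace_char (a b : Char) (cs : List Char) :
    PySem.Chars.replace cs [a] [b] = cs.map (fun c => if c = a then b else c) := by
  rw [PySem.Chars.replace]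
  simp [pv_replace_go a b cs [] cs.length le_rfl]

lemma pv_splitCh_ne_nil (s : Char) (l : List Char) : pvSplitCh s l ≠ [] := by
  cases l with
  | nil => simp [pvSplitCh]
  | cons c t =>
    simp only [pvSplitCh]
    split
    · simp
    · split <;> simp

lemma pv_split_go (s : Char) : ∀ (l cur : List Char) (acc : List (List Char)) (fuel : Nat), l.length ≤ fuel →
    PySem.Chars.splitOn.go [s] fuel l cur acc =
      acc.reverse ++ (cur.reverse ++ (pvSplitCh s l).headI) :: (pvSplitCh s l).tail := by
  intro l
  induction l with
  | nil =>
    intro cur acc fuel _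
    cases fuel <;> simp [PySem.Chars.splitOn.go, pvSplitCh]
  | cons c t ih =>
    intro cur acc fuel hf
    cases fuel with
    | zero => simp at hf
    | succ f =>
      have ht : t.length ≤ f := by simpa using hf
      rw [PySem.Chars.splitOn.go]
      by_cases h : c = s
      · subst h
        simp [List.isPrefixOf, ih _ _ _ ht]
        cases hh : pvSplitCh c t with
        | nil => exact absurd hh (pv_splitCh_ne_nil c t)
        | cons p ps => simp [pvSplitCh, hh]
      · simp only [List.isPrefixOf, Bool.and_true, beq_iff_eq, Ne.symm h, if_false, ih _ _ _ ht]
        cases hh : pvSplitCh s t with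
        | nil => exact absurd hh (pv_splitCh_ne_nil s t)
        | cons p ps => simp [pvSplitCh, h, hh]

lemma pv_splitOn_char (s : Char) (cs : List Char) : PySem.Chars.splitOn cs [s] = pvSplitCh s cs := by
  rw [PySem.Chars.splitOn, pv_split_go s cs [] [] _ (by omega)]
  cases hh : pvSplitCh s cs with
  | nil => exact absurd hh (pv_splitCh_ne_nil s cs)
  | cons p ps => simp

lemma pv_isspace_not_digit (c : Char) (h : PySem.Chars.isspace c = true) : PySem.Chars.isdigit c = false := by
  simp only [PySem.Chars.isspace, Bool.or_eq_true, Bool.and_eq_true, decide_eq_true_eq] at h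
  simp only [PySem.Chars.isdigit, Bool.and_eq_false_iff, decide_eq_false_iff_not, Char.le_def, UInt32.le_iff_toNat_le]
  have h0 : ('0' : Char).val.toNat = 48 := by decide
  have h9 : ('9' : Char).val.toNat = 57 := by decide
  rw [h0, h9]
  have : c.val.toNat = c.toNat := rfl
  omega

lemma pv_filter_digits_dropWhile (l : List Char) :
    (l.dropWhile PySem.Chars.isspace).filter PySem.Chars.isdigit = l.filter PySem.Chars.isdigit := by
  induction l with
  | nil => rfl
  | cons c t ih =>
    by_cases h : PySem.Chars.isspace c = true
    · rw [List.dropWhile_cons_of_pos h, ih, List.filter_cons_of_neg (by simp [pv_isspace_not_digit c h])]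
    · rw [List.dropWhile_cons_of_neg (by simpa using h)]

lemma pv_filter_digits_strip (l : List Char) :
    (PySem.Chars.strip l).filter PySem.Chars.isdigit = l.filter PySem.Chars.isdigit := by
  rw [PySem.Chars.strip, PySem.Chars.rstrip, PySem.Chars.lstrip]
  rw [List.filter_reverse, pv_filter_digits_dropWhile, List.filter_reverse, List.reverse_reverse,
      pv_filter_digits_dropWhile]

lemma pv_strip_nil_filter (l : List Char) (h : PySem.Chars.strip l = []) :
    l.filter PySem.Chars.isdigit = [] := by
  rw [← pv_filter_digits_strip, h]
  rfl

lemma pv_ofList_eq_empty (l : List Char) : (String.ofList l = "") ↔ l = [] := by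
  constructor
  · intro h
    have := congrArg String.toList h
    simpa using this
  · intro h; subst h; rfl

-- A's foldl over tokens is a filterMap
lemma pv_foldA (ts : List String) : ∀ (init : List String),
    ts.foldl (fun codes t =>
        let digits := String.ofList (t.toList.filter PySem.Chars.isdigit)
        if digits ≠ "" then codes ++ [PySem.Str.zfill digits 6] else codes) init
      = init ++ ts.filterMap (fun t =>
          if t.toList.filter PySem.Chars.isdigit = [] then none
          else some (PySem.Str.zfill (String.ofList (t.toList.filter PySem.Chars.isdigit)) 6)) := by
  induction ts with
  | nil => intro init; simp
  | cons t ts ih =>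
    intro init
    rw [List.foldl_cons, List.filterMap_cons]
    by_cases hd : t.toList.filter PySem.Chars.isdigit = []
    · have h1 : String.ofList (t.toList.filter PySem.Chars.isdigit) = "" := by
        rw [hd]
      rw [if_pos hd]
      simp only [h1, ne_eq, not_true_eq_false, if_false]
      exact ih init
    · have h1 : String.ofList (t.toList.filter PySem.Chars.isdigit) ≠ "" := by
        simpa [pv_ofList_eq_empty] using hd
      rw [if_neg hd]
      simp only [h1, ne_eq, not_false_eq_true, if_true]
      rw [ih (init ++ [PySem.Str.zfill (String.ofList (t.toList.filter PySem.Chars.isdigit)) 6])]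
      simp

-- A's token pipeline (strip, drop empties, keep nonempty digit strings) is pvCodes
lemma pv_tokens (ts : List (List Char)) :
    ((ts.map (fun p => PySem.Str.strip (String.ofList p))).filter (fun t => t ≠ "")).filterMap
        (fun t =>
          if t.toList.filter PySem.Chars.isdigit = [] then none
          else some (PySem.Str.zfill (String.ofList (t.toList.filter PySem.Chars.isdigit)) 6))
      = pvCodes ts := by
  induction ts with
  | nil => simp [pvCodes]
  | cons p ts ih =>
    have hstrip : PySem.Str.strip (String.ofList p) = String.ofList (PySem.Chars.strip p) := by
      simp [PySem.Str.strip]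
    rw [List.map_cons, List.filter_cons]
    by_cases hp : PySem.Chars.strip p = []
    · have hEmpty : PySem.Str.strip (String.ofList p) = "" := by rw [hstrip, hp]
      rw [hEmpty]
      have hcode : pvCodes (p :: ts) = pvCodes ts := by
        unfold pvCodes
        rw [List.filterMap_cons_none]
        rw [if_pos (pv_strip_nil_filter p hp)]
      simp only [ne_eq, not_true_eq_false, decide_false, Bool.false_eq_true, if_false]
      rw [ih, hcode]
    · have hne : PySem.Str.strip (String.ofList p) ≠ "" := by
        rw [hstrip]; simpa [pv_ofList_eq_empty] using hp
      have hdig : (PySem.Str.strip (String.ofList p)).toList.filter PySem.Chars.isdigit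
          = p.filter PySem.Chars.isdigit := by
        rw [hstrip]
        simpa using pv_filter_digits_strip p
      simp only [ne_eq, hne, not_false_eq_true, decide_true, if_true]
      by_cases hd : p.filter PySem.Chars.isdigit = []
      · have hf0 : (if (PySem.Str.strip (String.ofList p)).toList.filter PySem.Chars.isdigit = ([] : List Char)
            then (none : Option String)
            else some (PySem.Str.zfill (String.ofList ((PySem.Str.strip (String.ofList p)).toList.filter PySem.Chars.isdigit)) 6)) = none := by
          rw [hdig]; exact if_pos hd
        rw [List.filterMap_cons_none (f := fun t : String =>
            if t.toList.filter PySem.Chars.isdigit = [] then none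
            else some (PySem.Str.zfill (String.ofList (t.toList.filter PySem.Chars.isdigit)) 6)) hf0, ih]
        have hg0 : (if p.filter PySem.Chars.isdigit = ([] : List Char) then (none : Option String)
            else some (pvCode (p.filter PySem.Chars.isdigit))) = none := if_pos hd
        unfold pvCodes
        rw [List.filterMap_cons_none (f := fun q : List Char =>
            if q.filter PySem.Chars.isdigit = [] then none
            else some (pvCode (q.filter PySem.Chars.isdigit))) hg0]
      · have hf1 : (if (PySem.Str.strip (String.ofList p)).toList.filter PySem.Chars.isdigit = ([] : List Char)
            then (none : Option String)
            else some (PySem.Str.zfill (String.ofList ((PySem.Str.strip (String.ofList p)).toList.filter PySem.Chars.isdigit)) 6))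
            = some (PySem.Str.zfill (String.ofList (p.filter PySem.Chars.isdigit)) 6) := by
          rw [hdig]; exact if_neg hd
        rw [List.filterMap_cons_some (f := fun t : String =>
            if t.toList.filter PySem.Chars.isdigit = [] then none
            else some (PySem.Str.zfill (String.ofList (t.toList.filter PySem.Chars.isdigit)) 6)) hf1, ih]
        have hg1 : (if p.filter PySem.Chars.isdigit = ([] : List Char) then (none : Option String)
            else some (pvCode (p.filter PySem.Chars.isdigit))) = some (pvCode (p.filter PySem.Chars.isdigit)) := if_neg hd
        unfold pvCodes
        rw [List.filterMap_cons_some (f := fun q : List Char =>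
            if q.filter PySem.Chars.isdigit = [] then none
            else some (pvCode (q.filter PySem.Chars.isdigit))) hg1]
        rfl

lemma pv_codes_cons (p : List Char) (ps : List (List Char)) :
    pvCodes (p :: ps)
      = (if p.filter PySem.Chars.isdigit = [] then []
         else [pvCode (p.filter PySem.Chars.isdigit)]) ++ pvCodes ps := by
  by_cases hd : p.filter PySem.Chars.isdigit = []
  · unfold pvCodes
    rw [List.filterMap_cons_none (f := fun q : List Char =>
        if q.filter PySem.Chars.isdigit = [] then none
        else some (pvCode (q.filter PySem.Chars.isdigit))) (if_pos hd), if_pos hd]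
    simp
  · unfold pvCodes
    rw [List.filterMap_cons_some (f := fun q : List Char =>
        if q.filter PySem.Chars.isdigit = [] then none
        else some (pvCode (q.filter PySem.Chars.isdigit))) (if_neg hd), if_neg hd]
    simp

-- B's scan computes exactly A's codes of the split of the separator-normalised string
lemma pv_scan (cs : List Char) : ∀ (buf : List Char),
    pvScan buf cs =
      (if buf ++ ((pvSplitCh ' ' (cs.map pvSig)).headI).filter PySem.Chars.isdigit = [] then []
       else [pvCode (buf ++ ((pvSplitCh ' ' (cs.map pvSig)).headI).filter PySem.Chars.isdigit)])
      ++ pvCodes ((pvSplitCh ' ' (cs.map pvSig)).tail) := by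
  induction cs with
  | nil => intro buf; simp [pvScan, pvSplitCh, pvCodes]
  | cons c t ih =>
    intro buf
    by_cases hs : pvIsSepB c = true
    · have hσ : pvSig c = ' ' := by simp [pvSig, hs]
      rw [show (c :: t).map pvSig = ' ' :: t.map pvSig by simp [hσ]]
      rw [show pvSplitCh ' ' (' ' :: t.map pvSig) = [] :: pvSplitCh ' ' (t.map pvSig) by
        simp [pvSplitCh]]
      cases hh : pvSplitCh ' ' (t.map pvSig) with
      | nil => exact absurd hh (pv_splitCh_ne_nil _ _)
      | cons p ps =>
        simp only [pvScan, hs, if_true, ih []]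
        rw [hh]
        simp only [List.headI_cons, List.tail_cons]
        rw [pv_codes_cons]
        simp [pvCode]
    · have hc : c ≠ ' ' := by
        intro h; subst h; simp [pvIsSepB] at hs
      have hσ : pvSig c = c := by simp [pvSig, hs]
      rw [show (c :: t).map pvSig = c :: t.map pvSig by simp [hσ]]
      cases hh : pvSplitCh ' ' (t.map pvSig) with
      | nil => exact absurd hh (pv_splitCh_ne_nil _ _)
      | cons p ps =>
        rw [show pvSplitCh ' ' (c :: t.map pvSig) = (c :: p) :: ps by
          simp [pvSplitCh, hc, hh]]
        by_cases hd : PySem.Chars.isdigit c = true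
        · simp only [pvScan, hs, hd, if_true, ih (buf ++ [c])]
          rw [hh]
          simp [hd]
        · simp only [pvScan, hs, hd, ih buf]
          rw [hh]
          simp [hd]

-- stepping B's machine with seen = out (as lists) folds Set.add over the scanned codes
lemma pv_foldB (cs : List Char) : ∀ (out : List String) (buf : List Char),
    (pvFlushB (cs.foldl pvStepB (out, (out : PySem.Set String), buf))).1
      = (pvScan buf cs).foldl PySem.Set.add out := by
  induction cs with
  | nil =>
    intro out buf
    by_cases hb : buf = []
    · simp [pvFlushB, pvScan, hb]
    · by_cases hm : PySem.Str.zfill (String.ofList buf) 6 ∈ out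
      · simp [pvFlushB, pvScan, hb, hm, pvCode, PySem.Set.add]
      · simp [pvFlushB, pvScan, hb, hm, pvCode, PySem.Set.add]
  | cons c t ih =>
    intro out buf
    rw [List.foldl_cons]
    by_cases hs : pvIsSepB c = true
    · by_cases hb : buf = []
      · have hstate : pvStepB (out, (out : PySem.Set String), buf) c
            = (out, (out : PySem.Set String), []) := by
          simp [pvStepB, pvFlushB, hs, hb]
        rw [hstate, ih out []]
        simp [pvScan, hs, hb]
      · by_cases hm : PySem.Str.zfill (String.ofList buf) 6 ∈ out
        · have hstate : pvStepB (out, (out : PySem.Set String), buf) c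
              = (out, (out : PySem.Set String), []) := by
            simp [pvStepB, pvFlushB, hs, hb, hm]
          rw [hstate, ih out []]
          simp [pvScan, hs, hb, pvCode, PySem.Set.add, hm]
        · have hadd : PySem.Set.add (out : PySem.Set String) (PySem.Str.zfill (String.ofList buf) 6)
              = out ++ [PySem.Str.zfill (String.ofList buf) 6] := by
            simp [PySem.Set.add, hm]
          have hstate : pvStepB (out, (out : PySem.Set String), buf) c
              = (out ++ [PySem.Str.zfill (String.ofList buf) 6],
                 ((out ++ [PySem.Str.zfill (String.ofList buf) 6] : List String) : PySem.Set String), []) := by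
            simp [pvStepB, pvFlushB, hs, hb, hm]
          rw [hstate, ih (out ++ [PySem.Str.zfill (String.ofList buf) 6]) []]
          simp [pvScan, hs, hb, pvCode, PySem.Set.add, hm]
    · by_cases hd : PySem.Chars.isdigit c = true
      · have hstate : pvStepB (out, (out : PySem.Set String), buf) c
            = (out, (out : PySem.Set String), buf ++ [c]) := by
          simp [pvStepB, hs, hd]
        rw [hstate, ih out (buf ++ [c])]
        simp [pvScan, hs, hd]
      · have hstate : pvStepB (out, (out : PySem.Set String), buf) c
            = (out, (out : PySem.Set String), buf) := by
          simp [pvStepB, hs, hd]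
        rw [hstate, ih out buf]
        simp [pvScan, hs, hd]

lemma pv_sig_maps (cs : List Char) :
    ((cs.map (fun c => if c = '\n' then ' ' else c)).map (fun c => if c = '\t' then ' ' else c)).map
        (fun c => if c = ',' then ' ' else c) = cs.map pvSig := by
  simp only [List.map_map]
  apply List.map_congr_left
  intro c _
  simp only [Function.comp, pvSig, pvIsSepB]
  by_cases h1 : c = '\n'
  · subst h1; decide
  · by_cases h2 : c = '\t'
    · subst h2; decide
    · by_cases h3 : c = ','
      · subst h3; decide
      · by_cases h4 : c = ' '
        · subst h4; decide
        · simp [h1, h2, h3, h4]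

-- A in closed form: dedup of the codes of the tokens of the normalised character list
lemma pv_A_closed (peer_str : String) :
    parse_peer_codes peer_str
      = PySem.List.dedup (pvCodes (pvSplitCh ' ' (peer_str.toList.map pvSig))) := by
  unfold parse_peer_codes
  have hn : ("\n" : String).toList = ['\n'] := rfl
  have ht : ("\t" : String).toList = ['\t'] := rfl
  have hc : ("," : String).toList = [','] := rfl
  have hsp : (" " : String).toList = [' '] := rfl
  simp only [PySem.Str.replace, String.toList_ofList, hn, ht, hc, hsp]
  rw [pv_replace_char, pv_replace_char, pv_replace_char, pv_sig_maps]
  simp only [PySem.Str.split?, String.toList_ofList, PySem.Chars.split?, hsp,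
    List.isEmpty_cons, Bool.false_eq_true, if_false, Option.map_some, Option.getD_some,
    List.map_map]
  rw [pv_splitOn_char, pv_foldA]
  rw [show (PySem.Str.strip ∘ String.ofList) = (fun p : List Char => PySem.Str.strip (String.ofList p)) from rfl]
  rw [pv_tokens]
  simp

-- B in closed form
lemma pv_B_closed (peer_str : String) :
    parse_peer_codes_alt peer_str
      = PySem.List.dedup (pvCodes (pvSplitCh ' ' (peer_str.toList.map pvSig))) := by
  unfold parse_peer_codes_alt
  rw [show (([], PySem.Set.empty, []) : List String × PySem.Set String × List Char)
      = (([] : List String), (([] : List String) : PySem.Set String), ([] : List Char)) from rfl]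
  rw [pv_foldB peer_str.toList [] []]
  rw [pv_scan peer_str.toList []]
  cases hh : pvSplitCh ' ' (peer_str.toList.map pvSig) with
  | nil => exact absurd hh (pv_splitCh_ne_nil _ _)
  | cons p ps =>
    simp only [List.headI, List.tail, List.nil_append]
    rw [show PySem.List.dedup (pvCodes (p :: ps))
        = List.foldl PySem.Set.add ([] : PySem.Set String) (pvCodes (p :: ps)) from rfl]
    congr 1
    rw [pv_codes_cons]

-- ===== VERDICT (by name: the statement is the Claim_ definition above) =====
theorem parse_peer_codes_spec : Claim_equal_parse_peer_codes := by
  intro peer_str _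
  unfold Spec_parse_peer_codes
  rw [pv_A_closed, pv_B_closed]
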